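-- pv_equiv track=rewrite | github.com/qws941/fortinet | src/security/ai_threat_detector.py | _has_malicious_payload
-- ===== SOURCE A (Python) =====
-- from typing import Any, Dict, List
--
-- def _has_malicious_payload(packet: Dict[str, Any]) -> bool:
--     """Check for known malicious patterns in payload"""
--     payload = packet.get("payload", "")
--     if not payload:
--         return False
--
--     # Simplified malicious pattern detection
--     malicious_patterns = [
--         "../../",  # Directory traversal
--         "<script>",  # XSS attempt
--         "DROP TABLE",  # SQL injection
--         "cmd.exe",  # Command execution
--         "/etc/passwd",  # System file access
--     ]
--
--     payload_str = str(payload).lower()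
--     return any(pattern.lower() in payload_str for pattern in malicious_patterns)
-- ===== SOURCE B (Python) =====
-- def _fold(c):
--     """ASCII-lowercase one character."""
--     return chr(ord(c) + 32) if 'A' <= c <= 'Z' else c
--
-- def _match_at(s, i, p):
--     """Does pattern p match s at position i, case-insensitively (ASCII)?"""
--     if i + len(p) > len(s):
--         return False
--     return all(_fold(s[i + j]) == p[j] for j in range(len(p)))
--
-- def _has_malicious_payload(packet):
--     """Check for known malicious patterns in payload (single indexed scan,
--     per-character case folding instead of lowering the whole payload)."""
--     payload = packet.get("payload", "")
--     if not payload: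
--         return False
--
--     patterns = ("../../", "<script>", "drop table", "cmd.exe", "/etc/passwd")
--     s = str(payload)
--     i = 0
--     n = len(s)
--     while i < n:
--         for p in patterns:
--             if _match_at(s, i, p):
--                 return True
--         i += 1
--     return False
-- ===== Notes on version B (the rewrite author's own statement) =====
-- stated objective: alternative
-- what changed: A lowercases the whole payload and runs a separate library substring search for each of the five patterns; B never builds a lowered copy: it walks the payload once by index and, at each position, matches each pre-lowered pattern character by character with an ASCII case fold on the payload character.
import Mathlib
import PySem

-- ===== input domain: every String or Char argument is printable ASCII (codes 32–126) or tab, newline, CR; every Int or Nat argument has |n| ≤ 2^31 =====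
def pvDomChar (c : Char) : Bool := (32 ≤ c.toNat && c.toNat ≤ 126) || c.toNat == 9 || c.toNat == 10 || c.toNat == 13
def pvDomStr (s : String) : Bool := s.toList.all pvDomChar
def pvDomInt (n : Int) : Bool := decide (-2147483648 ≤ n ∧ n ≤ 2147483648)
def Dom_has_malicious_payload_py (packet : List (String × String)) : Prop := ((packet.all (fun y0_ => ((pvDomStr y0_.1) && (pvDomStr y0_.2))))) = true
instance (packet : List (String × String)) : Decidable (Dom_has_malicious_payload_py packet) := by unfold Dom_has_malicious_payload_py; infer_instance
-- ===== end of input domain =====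

-- B replaces A's lowercase-copy + five per-pattern library substring searches by a single
-- indexed scan matching the pre-lowered patterns character by character with an ASCII case
-- fold on each payload character (alternative; no lowered copy of the payload is built).

-- ===== PORT A =====
def has_malicious_payload_py (packet : List (String × String)) : Bool :=
  let payload := PySem.Dict.getD (PySem.Dict.mk packet) "payload" ""
  if payload = "" then false
  else
    let malicious_patterns : List String :=
      ["../../", "<script>", "DROP TABLE", "cmd.exe", "/etc/passwd"]
    let payload_str := PySem.Str.lower payload
    malicious_patterns.any (fun pattern =>
      PySem.Str.isIn (PySem.Str.lower pattern) payload_str)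

-- ===== PORT B =====
-- _fold: ASCII-lowercase one character
def bFold (c : Char) : Char :=
  if 'A' ≤ c ∧ c ≤ 'Z' then Char.ofNat (c.toNat + 32) else c

-- _match_at: p matches at the current position, folding each payload char;
-- the index arithmetic i+j over s becomes structural recursion on the suffix s.drop i
def bMatchAt : List Char → List Char → Bool
  | _, [] => true
  | [], _ :: _ => false
  | c :: s', q :: p' => bFold c == q && bMatchAt s' p'

-- the `while i < n` loop: try every pattern at the current position, then advance
def bScan (patterns : List (List Char)) : List Char → Bool
  | [] => false
  | c :: rest =>
      patterns.any (fun p => bMatchAt (c :: rest) p) || bScan patterns rest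

def has_malicious_payload_py_alt (packet : List (String × String)) : Bool :=
  let payload := PySem.Dict.getD (PySem.Dict.mk packet) "payload" ""
  if payload = "" then false
  else
    let patterns : List (List Char) :=
      ["../../".toList, "<script>".toList, "drop table".toList,
       "cmd.exe".toList, "/etc/passwd".toList]
    bScan patterns payload.toList

-- ===== PRECONDITION & SPEC =====
def Spec_has_malicious_payload_py (packet : List (String × String)) (out : Bool) : Prop := out = has_malicious_payload_py_alt packet
instance (packet : List (String × String)) (out : Bool) : Decidable (Spec_has_malicious_payload_py packet out) := by unfold Spec_has_malicious_payload_py; infer_instance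

-- ===== CLAIM (what is proved, stated in full; the proofs are below) =====
def Claim_equal_has_malicious_payload_py : Prop := ∀ (packet : List (String × String)), Dom_has_malicious_payload_py packet → Spec_has_malicious_payload_py packet (has_malicious_payload_py packet)

-- ===== LEMMAS AND PROOFS =====

-- bFold is definitionally PySem's ASCII lowerChar
lemma bFold_eq_lowerChar (c : Char) : bFold c = PySem.Chars.lowerChar c := by
  simp [bFold, PySem.Chars.lowerChar, PySem.Chars.isupper]

-- character-by-character folded matching is prefix-of-the-lowered-suffix
lemma bMatchAt_iff (p s : List Char) :
    bMatchAt s p = true ↔ p <+: s.map bFold := by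
  induction p generalizing s with
  | nil => simp [bMatchAt]
  | cons q p' ih =>
    cases s with
    | nil => simp [bMatchAt]
    | cons c s' =>
      simp only [bMatchAt, Bool.and_eq_true, beq_iff_eq, ih, List.map_cons,
        List.cons_prefix_cons]
      constructor <;> rintro ⟨h1, h2⟩ <;> exact ⟨h1.symm, h2⟩

-- the scan finds a match iff some pattern is a prefix of some lowered suffix
lemma bScan_iff (pats : List (List Char)) (s : List Char)
    (h : ∀ p ∈ pats, p ≠ []) :
    bScan pats s = true ↔ ∃ p ∈ pats, ∃ j, p <+: (s.map bFold).drop j := by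
  induction s with
  | nil =>
    simp only [bScan, List.map_nil, List.drop_nil, List.prefix_nil]
    constructor
    · intro hf; cases hf
    · rintro ⟨p, hp, _, hpe⟩; exact absurd hpe (h p hp)
  | cons c t ih =>
    simp only [bScan, Bool.or_eq_true, List.any_eq_true, ih, bMatchAt_iff]
    constructor
    · rintro (⟨p, hp, hpre⟩ | ⟨p, hp, j, hpre⟩)
      · exact ⟨p, hp, 0, by simpa using hpre⟩
      · exact ⟨p, hp, j + 1, by simpa using hpre⟩
    · rintro ⟨p, hp, j, hpre⟩
      cases j with
      | zero => exact Or.inl ⟨p, hp, by simpa using hpre⟩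
      | succ j' => exact Or.inr ⟨p, hp, j', by simpa using hpre⟩

-- B's on-the-fly folding scan equals A's search over the lowered string, pattern by pattern
lemma bScan_eq_any_isIn (pats : List (List Char)) (s : List Char)
    (h : ∀ p ∈ pats, p ≠ []) :
    bScan pats s = pats.any (fun p => PySem.Chars.isIn p (PySem.Chars.lower s)) := by
  apply Bool.eq_iff_iff.mpr
  rw [bScan_iff pats s h]
  simp only [List.any_eq_true, ← PySem.Chars.exists_prefix_drop_iff_isIn,
    PySem.Chars.lower]
  constructor
  · rintro ⟨p, hp, j, hj⟩
    exact ⟨p, hp, j, by simpa [bFold_eq_lowerChar, funext bFold_eq_lowerChar] using hj⟩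
  · rintro ⟨p, hp, j, hj⟩
    exact ⟨p, hp, j, by simpa [funext bFold_eq_lowerChar] using hj⟩

-- ===== VERDICT (by name: the statement is the Claim_ definition above) =====
theorem has_malicious_payload_py_spec : Claim_equal_has_malicious_payload_py := by
  intro packet _
  unfold Spec_has_malicious_payload_py has_malicious_payload_py has_malicious_payload_py_alt
  by_cases hp : PySem.Dict.getD (PySem.Dict.mk packet) "payload" "" = ""
  · simp [hp]
  · set s := PySem.Dict.getD (PySem.Dict.mk packet) "payload" "" with hs
    have key := bScan_eq_any_isIn
        ["../../".toList, "<script>".toList, "drop table".toList,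
         "cmd.exe".toList, "/etc/passwd".toList] s.toList (by decide)
    simp only [List.any_cons, List.any_nil] at key
    simp only [if_neg hp, List.any_cons, List.any_nil, PySem.Str.isIn_eq,
      PySem.Str.toList_lower]
    rw [show PySem.Chars.lower "../../".toList = "../../".toList from by decide,
       show PySem.Chars.lower "<script>".toList = "<script>".toList from by decide,
       show PySem.Chars.lower "DROP TABLE".toList = "drop table".toList from by decide,
       show PySem.Chars.lower "cmd.exe".toList = "cmd.exe".toList from by decide,
       show PySem.Chars.lower "/etc/passwd".toList = "/etc/passwd".toList from by decide]
    exact key.symm
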